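-- pv_equiv track=rewrite | github.com/shivaxiitd/MCP361 | MCP361_Assignment3/MCP361_Assignment3_Problem2.py | production_amount
-- ===== SOURCE A (Python) =====
-- def production_amount(PeriodOfOrders, Demand):
--     n = len(Demand)
--     order = [0]*n
--     l = len(PeriodOfOrders)
--     i = 0
--     while i < l:
--         start=PeriodOfOrders[i]
--         if i!=l-1:
--             end=PeriodOfOrders[i+1]
--         else:
--             end = n + 1
--         order[start]=sum(Demand[start:end])
--         i = i + 1
--     return order
-- ===== SOURCE B (Python) =====
-- def production_amount(PeriodOfOrders, Demand):
--     n = len(Demand)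
--     prefix = [0]
--     total = 0
--     for d in Demand:
--         total += d
--         prefix.append(total)
--
--     def segment_sum(i, j):
--         """sum(Demand[i:j]) in O(1) via the prefix table."""
--         lo, hi, _ = slice(i, j).indices(n)
--         return prefix[hi] - prefix[lo] if hi > lo else 0
--
--     order = [0] * n
--     for start, end in zip(PeriodOfOrders, PeriodOfOrders[1:] + [n + 1]):
--         order[start] = segment_sum(start, end)
--     return order
-- ===== Notes on version B (the rewrite author's own statement) =====
-- stated objective: faster
-- what changed: B builds a prefix-sum table in one pass and computes each order's amount as an O(1) table difference (slice bounds normalised with the stdlib slice.indices), pairing each period with its successor via zip instead of re-summing a demand slice inside a while loop.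
import Mathlib
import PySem

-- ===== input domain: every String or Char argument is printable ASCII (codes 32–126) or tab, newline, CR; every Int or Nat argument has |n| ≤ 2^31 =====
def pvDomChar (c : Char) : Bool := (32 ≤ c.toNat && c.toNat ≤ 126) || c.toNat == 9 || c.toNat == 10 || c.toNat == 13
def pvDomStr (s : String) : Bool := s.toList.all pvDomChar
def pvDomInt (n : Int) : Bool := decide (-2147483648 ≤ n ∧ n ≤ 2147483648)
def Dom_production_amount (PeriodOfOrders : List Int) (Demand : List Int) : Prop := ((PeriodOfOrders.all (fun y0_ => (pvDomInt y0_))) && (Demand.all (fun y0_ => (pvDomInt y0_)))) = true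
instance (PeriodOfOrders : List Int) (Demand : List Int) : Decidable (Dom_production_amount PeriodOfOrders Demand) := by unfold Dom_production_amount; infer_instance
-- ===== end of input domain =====

-- B replaces A's per-order slice summing by a one-pass prefix-sum table with
-- O(1) difference lookups, pairing each period with its successor by zip (faster).

-- ===== PORT A =====
def production_amount (PeriodOfOrders : List Int) (Demand : List Int) : List Int :=
  let n : Int := (Demand.length : Int)
  let order : List Int := List.replicate Demand.length 0
  let l : Int := (PeriodOfOrders.length : Int)
  -- while i < l over i = 0,…,l-1 as a fold over range(0, l)
  (PySem.List.pyRange 0 l 1).foldl (fun order i =>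
    let start := PySem.List.pyGetD PeriodOfOrders i 0
    let e := if i ≠ l - 1 then PySem.List.pyGetD PeriodOfOrders (i + 1) 0 else n + 1
    -- order[start] = sum(Demand[start:end]); pySetD is exact for in-range start (Pre_ excludes the rest)
    PySem.List.pySetD order start
      ((PySem.List.slice Demand (some start) (some e)).foldl (· + ·) 0)) order

-- ===== PORT B =====
def production_amount_alt (PeriodOfOrders : List Int) (Demand : List Int) : List Int :=
  let n : Int := (Demand.length : Int)
  -- prefix = [0]; total = 0; for d in Demand: total += d; prefix.append(total)
  let pref := (Demand.foldl (fun (pt : List Int × Int) d => (pt.1 ++ [pt.2 + d], pt.2 + d)) ([0], 0)).1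
  -- segment_sum(i, j): lo, hi, _ = slice(i, j).indices(n) — exactly PySem.List.clampIdx for step 1
  let segment_sum := fun (i j : Int) =>
    let lo := PySem.List.clampIdx Demand.length i
    let hi := PySem.List.clampIdx Demand.length j
    if hi > lo then PySem.List.pyGetD pref (hi : Int) 0 - PySem.List.pyGetD pref (lo : Int) 0 else 0
  let order : List Int := List.replicate Demand.length 0
  (PeriodOfOrders.zip (PeriodOfOrders.drop 1 ++ [n + 1])).foldl (fun order se =>
    PySem.List.pySetD order se.1 (segment_sum se.1 se.2)) order

-- ===== PRECONDITION & SPEC =====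
-- Pre_ excludes exactly the inputs with a period outside [-len(Demand), len(Demand)),
-- on which both A and B raise IndexError at order[start].
def Pre_production_amount (PeriodOfOrders : List Int) (Demand : List Int) : Prop :=
  ∀ p ∈ PeriodOfOrders, -(Demand.length : Int) ≤ p ∧ p < (Demand.length : Int)
instance (PeriodOfOrders : List Int) (Demand : List Int) : Decidable (Pre_production_amount PeriodOfOrders Demand) := by unfold Pre_production_amount; infer_instance
def pvWitness_production_amount : List Int × List Int := ([0, 1], [3, 4, 5])

def Spec_production_amount (PeriodOfOrders : List Int) (Demand : List Int) (out : List Int) : Prop := out = production_amount_alt PeriodOfOrders Demand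
instance (PeriodOfOrders : List Int) (Demand : List Int) (out : List Int) : Decidable (Spec_production_amount PeriodOfOrders Demand out) := by unfold Spec_production_amount; infer_instance

-- ===== CLAIM (what is proved, stated in full; the proofs are below) =====
def Claim_equal_production_amount : Prop := ∀ (PeriodOfOrders : List Int) (Demand : List Int), Dom_production_amount PeriodOfOrders Demand → Pre_production_amount PeriodOfOrders Demand → Spec_production_amount PeriodOfOrders Demand (production_amount PeriodOfOrders Demand)

-- ===== LEMMAS AND PROOFS =====

-- partial sums of ds starting from running total t (values appended to pref after the leading 0)
def psums : Int → List Int → List Int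
  | _, [] => []
  | t, d :: ds => (t + d) :: psums (t + d) ds

theorem psums_foldl : ∀ (ds acc : List Int) (t : Int),
    ds.foldl (fun (pt : List Int × Int) d => (pt.1 ++ [pt.2 + d], pt.2 + d)) (acc, t)
      = (acc ++ psums t ds, t + ds.sum) := by
  intro ds
  induction ds with
  | nil => intro acc t; simp [psums]
  | cons d ds ih =>
      intro acc t
      simp only [List.foldl_cons, psums, List.sum_cons]
      rw [ih]
      simp [List.append_assoc, add_assoc]

theorem getD_psums : ∀ (ds : List Int) (t : Int) (k : Nat), k ≤ ds.length →
    (t :: psums t ds).getD k 0 = t + (ds.take k).sum := by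
  intro ds
  induction ds with
  | nil =>
      intro t k hk
      have hk0 : k = 0 := by simpa using hk
      subst hk0
      simp
  | cons d ds ih =>
      intro t k hk
      cases k with
      | zero => simp
      | succ k =>
          simp only [psums, List.getD_cons_succ, List.take_succ_cons, List.sum_cons]
          rw [ih (t + d) k (by simpa using hk)]
          ring

theorem foldl_add_int : ∀ (xs : List Int) (a : Int), xs.foldl (· + ·) a = a + xs.sum := by
  intro xs
  induction xs with
  | nil => simp
  | cons x xs ih => intro a; simp only [List.foldl_cons, List.sum_cons]; rw [ih]; ring

-- A's slice sum equals B's segment_sum (prefix-table difference on clamped bounds), for ALL Int bounds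
theorem sliceSum (Demand : List Int) (s e : Int) :
    (PySem.List.slice Demand (some s) (some e)).foldl (· + ·) 0
      = (if PySem.List.clampIdx Demand.length e > PySem.List.clampIdx Demand.length s then
           PySem.List.pyGetD (0 :: psums 0 Demand) ((PySem.List.clampIdx Demand.length e : Nat) : Int) 0
             - PySem.List.pyGetD (0 :: psums 0 Demand) ((PySem.List.clampIdx Demand.length s : Nat) : Int) 0
         else 0) := by
  have hslice : PySem.List.slice Demand (some s) (some e)
      = (Demand.drop (PySem.List.clampIdx Demand.length s)).take
          (PySem.List.clampIdx Demand.length e - PySem.List.clampIdx Demand.length s) := by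
    simp [PySem.List.slice]
  set lo := PySem.List.clampIdx Demand.length s with hlo
  set hi := PySem.List.clampIdx Demand.length e with hhi
  have hlon : lo ≤ Demand.length := PySem.List.clampIdx_le _ _
  have hhin : hi ≤ Demand.length := PySem.List.clampIdx_le _ _
  rw [hslice, foldl_add_int]
  simp only [PySem.List.pyGetD_natCast, zero_add]
  by_cases hgt : hi > lo
  · rw [if_pos hgt,
      getD_psums Demand 0 hi hhin, getD_psums Demand 0 lo hlon]
    have hsplit : Demand.take hi = Demand.take lo ++ (Demand.drop lo).take (hi - lo) := by
      rw [← List.take_add]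
      congr 1
      omega
    rw [hsplit, List.sum_append]
    ring
  · rw [if_neg hgt]
    have h0 : hi - lo = 0 := by omega
    rw [h0]
    simp

-- the two loops, aligned: A's index fold over pre.length,…,l-1 equals B's zip fold over suf
theorem loops_eq (Demand : List Int) (body : Int → Int → List Int → List Int) :
    ∀ (suf pre order : List Int),
    (PySem.List.pyRange (pre.length : Int) (((pre ++ suf).length : Int)) 1).foldl
      (fun order i =>
        body (PySem.List.pyGetD (pre ++ suf) i 0)
          (if i ≠ ((pre ++ suf).length : Int) - 1
           then PySem.List.pyGetD (pre ++ suf) (i + 1) 0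
           else (Demand.length : Int) + 1) order) order
    = (suf.zip (suf.drop 1 ++ [(Demand.length : Int) + 1])).foldl
        (fun order se => body se.1 se.2 order) order := by
  intro suf
  induction suf with
  | nil =>
      intro pre order
      rw [PySem.List.pyRange_one_eq_nil (by simp)]
      simp
  | cons a suf ih =>
      intro pre order
      have hlen : ((pre.length : Int)) < (((pre ++ a :: suf).length : Int)) := by
        simp
      rw [PySem.List.pyRange_one_cons hlen, List.foldl_cons]
      have hget : PySem.List.pyGetD (pre ++ a :: suf) (pre.length : Int) 0 = a := by
        simp [PySem.List.pyGetD_natCast]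
      cases suf with
      | nil =>
          -- last order period: end = n + 1
          have hc : ¬ (((pre.length : Int)) ≠ (((pre ++ [a]).length : Int)) - 1) := by
            simp
          rw [hget, if_neg hc, PySem.List.pyRange_one_eq_nil (by simp), List.foldl_nil]
          rfl
      | cons b suf' =>
          have hne : ((pre.length : Int)) ≠ (((pre ++ a :: b :: suf').length : Int)) - 1 := by
            simp; omega
          have hgetb : PySem.List.pyGetD (pre ++ a :: b :: suf') ((pre.length : Int) + 1) 0 = b := by
            have hrw : pre ++ a :: b :: suf' = (pre ++ [a]) ++ b :: suf' := by simp
            have hcast : ((pre.length : Int) + 1) = (((pre ++ [a]).length : Nat) : Int) := by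
              simp
            rw [hrw, hcast, PySem.List.pyGetD_natCast]
            simp
          rw [hget, if_pos hne, hgetb]
          show _ = ((a, b) :: (b :: suf').zip ((b :: suf').drop 1 ++ [(Demand.length : Int) + 1])).foldl _ _
          rw [List.foldl_cons]
          have hrw : pre ++ a :: b :: suf' = (pre ++ [a]) ++ b :: suf' := by simp
          have hcast : ((pre.length : Int) + 1) = (((pre ++ [a]).length : Nat) : Int) := by simp
          rw [hrw, hcast]
          exact ih (pre ++ [a]) _

-- ===== VERDICT (by name: the statement is the Claim_ definition above) =====
theorem production_amount_spec : Claim_equal_production_amount := by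
  intro Po Demand _hDom _hPre
  unfold Spec_production_amount production_amount production_amount_alt
  rw [psums_foldl Demand [0] 0]
  simp only [List.singleton_append]
  have hbody : ∀ s e order, PySem.List.pySetD order s
        ((PySem.List.slice Demand (some s) (some e)).foldl (· + ·) 0)
      = PySem.List.pySetD order s
          (let lo := PySem.List.clampIdx Demand.length s
           let hi := PySem.List.clampIdx Demand.length e
           if hi > lo then
             PySem.List.pyGetD (0 :: psums 0 Demand) ((hi : Nat) : Int) 0
               - PySem.List.pyGetD (0 :: psums 0 Demand) ((lo : Nat) : Int) 0
           else 0) := by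
    intro s e order
    rw [sliceSum Demand s e]
  have := loops_eq Demand
    (fun s e order => PySem.List.pySetD order s
      ((PySem.List.slice Demand (some s) (some e)).foldl (· + ·) 0))
    Po [] (List.replicate Demand.length 0)
  simp only [List.nil_append, List.length_nil, Nat.cast_zero] at this
  rw [this]
  apply PySem.List.foldl_congr_mem
  intro order se _
  exact hbody se.1 se.2 order
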